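-- pv_equiv track=rewrite | github.com/tctn27/combiner_discord_bot | Beems.py | only_letters
-- ===== SOURCE A (Python) =====
-- def only_letters(word):
--     letters = ["a", "b", "c", "d", "e", "f", "g", "h", "i", "j", "k", "l", "m", "n", "o", "p", "q", "r", "s", "t", "u",
--                "v", "w", "x", "y", "z"]
--     word = word.lower()
--     for letter in word:
--         if letter not in letters:
--             return False
--     return True
-- ===== SOURCE B (Python) =====
-- def only_letters(word):
--     def ok(s):
--         if len(s) == 0:
--             return True
--         if len(s) == 1:
--             c = s.lower()
--             return 'a' <= c <= 'z'
--         mid = len(s) // 2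
--         return ok(s[:mid]) and ok(s[mid:])
--     return ok(word)
-- ===== Notes on version B (the rewrite author's own statement) =====
-- stated objective: alternative
-- what changed: Replaces A's linear left-to-right scan with early return and a 26-element membership list by a divide-and-conquer recursion that splits the string in halves and, at single-character leaves, decides letterhood by an arithmetic range comparison 'a' <= c <= 'z' on the lowercased character.
import Mathlib
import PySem

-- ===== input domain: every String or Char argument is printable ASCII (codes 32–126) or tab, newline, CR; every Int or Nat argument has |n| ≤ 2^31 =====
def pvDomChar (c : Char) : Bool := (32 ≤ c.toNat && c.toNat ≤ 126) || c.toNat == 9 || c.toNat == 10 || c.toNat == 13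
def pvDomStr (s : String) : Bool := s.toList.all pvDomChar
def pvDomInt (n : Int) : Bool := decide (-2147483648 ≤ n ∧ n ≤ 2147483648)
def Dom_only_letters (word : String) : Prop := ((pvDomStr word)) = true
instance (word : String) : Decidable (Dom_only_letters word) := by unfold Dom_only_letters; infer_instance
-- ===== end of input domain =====

-- B replaces A's linear scan (membership in a 26-element list, early return) by a
-- divide-and-conquer halving recursion whose 1-char leaves use an arithmetic range
-- comparison on the lowercased character (objective: alternative).
-- ===== PORT A =====
def pyLetters : List Char := ['a','b','c','d','e','f','g','h','i','j','k','l','m','n','o','p','q','r','s','t','u','v','w','x','y','z']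

def only_letters_loop (cs : List Char) : Bool :=
  match cs with
  | [] => true
  | c :: rest => if c ∈ pyLetters then only_letters_loop rest else false

def only_letters (word : String) : Bool :=
  only_letters_loop (PySem.Chars.lower word.toList)

-- ===== PORT B =====
-- Source B's ok(s): split the string at len(s)//2 (s[:mid] / s[mid:] with 0 ≤ mid ≤ len are exactly
-- take/drop); at a 1-char leaf, Python's "'a' <= s.lower() <= 'z'" compares 1-character
-- strings, which is exactly the code-point comparison of the single lowercased character.
def only_letters_ok (cs : List Char) : Bool :=
  match cs with
  | [] => true
  | [c] =>
      let d := PySem.Chars.lowerChar c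
      decide ('a' ≤ d) && decide (d ≤ 'z')
  | c1 :: c2 :: rest =>
      let mid := (c1 :: c2 :: rest).length / 2
      only_letters_ok ((c1 :: c2 :: rest).take mid) && only_letters_ok ((c1 :: c2 :: rest).drop mid)
termination_by cs.length
decreasing_by
  · simp; omega
  · simp; omega

def only_letters_alt (word : String) : Bool :=
  only_letters_ok word.toList

-- ===== PRECONDITION & SPEC =====
def Spec_only_letters (word : String) (out : Bool) : Prop := out = only_letters_alt word
instance (word : String) (out : Bool) : Decidable (Spec_only_letters word out) := by unfold Spec_only_letters; infer_instance

-- ===== CLAIM =====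
def Claim_equal_only_letters : Prop := ∀ (word : String), Dom_only_letters word → Spec_only_letters word (only_letters word)

-- ===== LEMMAS AND PROOFS =====
lemma mem_pyLetters (d : Char) : (d ∈ pyLetters) ↔ (97 ≤ d.toNat ∧ d.toNat ≤ 122) := by
  constructor
  · intro h; fin_cases h <;> simp
  · rintro ⟨h1, h2⟩
    have key : ∀ n : Fin 123, 97 ≤ n.1 → Char.ofNat n.1 ∈ pyLetters := by decide
    have := key ⟨d.toNat, by omega⟩ h1
    rwa [Char.ofNat_toNat] at this

lemma le_a_iff (d : Char) : ('a' ≤ d) ↔ 97 ≤ d.toNat := by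
  rw [Char.le_def, UInt32.le_iff_toNat_le]; exact Iff.rfl

lemma le_z_iff (d : Char) : (d ≤ 'z') ↔ d.toNat ≤ 122 := by
  rw [Char.le_def, UInt32.le_iff_toNat_le]; exact Iff.rfl

lemma char_check (d : Char) : (decide ('a' ≤ d) && decide (d ≤ 'z')) = decide (d ∈ pyLetters) := by
  rw [Bool.eq_iff_iff]
  simp [mem_pyLetters, le_a_iff, le_z_iff]

lemma loop_eq_all (cs : List Char) :
    only_letters_loop cs = cs.all (fun c => decide (c ∈ pyLetters)) := by
  induction cs with
  | nil => rfl
  | cons c rest ih =>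
      simp only [only_letters_loop, List.all_cons]
      by_cases h : c ∈ pyLetters <;> simp [h, ih]

lemma ok_eq_all (cs : List Char) :
    only_letters_ok cs =
      cs.all (fun c => decide ('a' ≤ PySem.Chars.lowerChar c) && decide (PySem.Chars.lowerChar c ≤ 'z')) := by
  fun_induction only_letters_ok cs with
  | case1 => rfl
  | case2 c => simp only [List.all_cons, List.all_nil, Bool.and_true]; rfl
  | case3 c1 c2 rest mid ih1 ih2 =>
      rw [ih1, ih2, ← List.all_append, List.take_append_drop]

-- ===== VERDICT =====
theorem only_letters_spec : Claim_equal_only_letters := by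
  intro word _
  unfold Spec_only_letters only_letters only_letters_alt
  rw [loop_eq_all, ok_eq_all]
  have hl : PySem.Chars.lower word.toList = word.toList.map PySem.Chars.lowerChar := by
    simp [PySem.Chars.lower]
  rw [hl, List.all_map]
  exact congrArg word.toList.all (funext fun c => (char_check _).symm)
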